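-- pv_equiv track=rewrite | github.com/henniseppis/Algoritmit-harjoitusty- | src/ai/opponent.py | find_nearest_free_cells
-- ===== SOURCE A (Python) =====
-- def find_nearest_free_cells(board, row, col):
--     """ This functions finds the nearest free cells which are max 2 cells away in every direction from the last move made
--     and adds them to the list. It stars with the closest ones of the last move. """
--
--     smallest_col = col - 2
--     smallest_row = row - 2
--
--
--     nearest_cells = []
--     for row in range(smallest_row, smallest_row + 4):
--         for col in range(smallest_col, smallest_col + 4):
--             if (row < 0 or row >= 20 or col < 0 or col >= 20 or board[row][col] != " "):
--                 pass
--             else: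
--                 nearest_cells.append((row, col))
--
--     smallest_col += 1
--     smallest_row += 1
--
--     for row in range(smallest_row, smallest_row + 2):
--         for col in range(smallest_col, smallest_col + 2):
--             if (row < 0 or row >= 20 or col < 0 or col >= 20 or board[row][col] != " "):
--                 pass
--             else:
--                 if (row, col) not in nearest_cells:
--                     nearest_cells.append((row, col))
--     return nearest_cells
-- ===== SOURCE B (Python) =====
-- def find_nearest_free_cells(board, row, col):
--     """Scan the board itself with enumerate instead of indexing a window:
--     walk every (r, line) of the board, skip rows outside the 4-row band
--     [row-2, row+2) or beyond row 19, and inside a kept row walk every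
--     (c, cell), keeping cells in the band [col-2, col+2), below col 20 and
--     free.  Never indexes board[r][c], so no bound checks on the board and
--     no second de-duplicating pass; order is row-major like A's."""
--     out = []
--     for r, line in enumerate(board):
--         if r < row - 2 or r >= row + 2 or r >= 20:
--             continue
--         for c, cell in enumerate(line):
--             if col - 2 <= c < col + 2 and c < 20 and cell == " ":
--                 out.append((r, c))
--     return out
-- ===== Notes on version B (the rewrite author's own statement) =====
-- stated objective: alternative
-- what changed: B scans the board itself with enumerate (rows, then cells) and filters each visited coordinate by the window bands and freeness, instead of A's two passes of range-generated window indices with board[r][c] lookups and a membership-tested second 2x2 pass; B never indexes the board at all.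
import Mathlib
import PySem

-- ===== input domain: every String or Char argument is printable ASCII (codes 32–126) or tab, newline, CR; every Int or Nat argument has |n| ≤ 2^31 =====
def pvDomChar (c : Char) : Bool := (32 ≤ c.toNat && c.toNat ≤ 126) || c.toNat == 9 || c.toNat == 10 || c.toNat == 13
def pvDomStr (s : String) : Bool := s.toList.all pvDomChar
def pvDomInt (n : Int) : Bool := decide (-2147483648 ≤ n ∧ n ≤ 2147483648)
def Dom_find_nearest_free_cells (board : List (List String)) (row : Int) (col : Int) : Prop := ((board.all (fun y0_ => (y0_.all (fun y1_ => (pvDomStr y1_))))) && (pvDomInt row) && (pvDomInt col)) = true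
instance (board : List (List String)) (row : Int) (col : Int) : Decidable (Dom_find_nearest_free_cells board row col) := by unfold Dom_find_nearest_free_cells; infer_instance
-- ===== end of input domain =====

-- B scans the board itself with enumerate and filters each visited coordinate, instead of
-- A's two passes of range-generated window indices with board[r][c] lookups; objective:
-- alternative (same result, different traversal). Neither program mutates its arguments.

-- ===== PORT A =====
-- board[r][c]: A indexes the board only where Pre_ guarantees the indices are in range,
-- so the .getD defaults are never reached on inputs satisfying Pre_.
def pvCell (board : List (List String)) (r c : Int) : String :=
  (PySem.List.pyGet? ((PySem.List.pyGet? board r).getD []) c).getD ""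

def find_nearest_free_cells (board : List (List String)) (row : Int) (col : Int) : List (Int × Int) :=
  let smallest_col := col - 2
  let smallest_row := row - 2
  let nearest_cells :=
    (PySem.List.pyRange smallest_row (smallest_row + 4) 1).foldl (fun acc r =>
      (PySem.List.pyRange smallest_col (smallest_col + 4) 1).foldl (fun acc c =>
        if r < 0 ∨ 20 ≤ r ∨ c < 0 ∨ 20 ≤ c ∨ pvCell board r c ≠ " " then acc
        else acc ++ [(r, c)]) acc) []
  let smallest_col := smallest_col + 1
  let smallest_row := smallest_row + 1
  (PySem.List.pyRange smallest_row (smallest_row + 2) 1).foldl (fun acc r =>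
    (PySem.List.pyRange smallest_col (smallest_col + 2) 1).foldl (fun acc c =>
      if r < 0 ∨ 20 ≤ r ∨ c < 0 ∨ 20 ≤ c ∨ pvCell board r c ≠ " " then acc
      else if (r, c) ∈ acc then acc else acc ++ [(r, c)]) acc) nearest_cells

-- ===== PORT B =====
-- 'for r, line in enumerate(board): … continue … for c, cell in enumerate(line): …'
def find_nearest_free_cells_alt (board : List (List String)) (row : Int) (col : Int) : List (Int × Int) :=
  (PySem.List.enumerate board).foldl (fun out p =>
    if p.1 < row - 2 ∨ row + 2 ≤ p.1 ∨ 20 ≤ p.1 then out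
    else (PySem.List.enumerate p.2).foldl (fun out q =>
      if col - 2 ≤ q.1 ∧ q.1 < col + 2 ∧ q.1 < 20 ∧ q.2 = " " then out ++ [(p.1, q.1)]
      else out) out) []

-- ===== PRECONDITION & SPEC =====
-- Pre_ excludes exactly the inputs where A raises IndexError (a window cell whose indices
-- pass the 0..19 bound checks but lie outside the actual board).
def Pre_find_nearest_free_cells (board : List (List String)) (row : Int) (col : Int) : Prop :=
  ∀ r ∈ PySem.List.pyRange (row - 2) (row + 2) 1, 0 ≤ r → r < 20 →
    ∀ c ∈ PySem.List.pyRange (col - 2) (col + 2) 1, 0 ≤ c → c < 20 →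
      r.toNat < board.length ∧ c.toNat < (board.getD r.toNat []).length
instance (board : List (List String)) (row : Int) (col : Int) : Decidable (Pre_find_nearest_free_cells board row col) := by unfold Pre_find_nearest_free_cells; infer_instance

def pvWitness_find_nearest_free_cells : List (List String) × Int × Int :=
  ([[" ", "X"], ["X", " "]], 0, 0)

def Spec_find_nearest_free_cells (board : List (List String)) (row : Int) (col : Int) (out : List (Int × Int)) : Prop := out = find_nearest_free_cells_alt board row col
instance (board : List (List String)) (row : Int) (col : Int) (out : List (Int × Int)) : Decidable (Spec_find_nearest_free_cells board row col out) := by unfold Spec_find_nearest_free_cells; infer_instance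

-- ===== CLAIM (what is proved, stated in full; the proofs are below) =====
def Claim_equal_find_nearest_free_cells : Prop := ∀ (board : List (List String)) (row : Int) (col : Int), Dom_find_nearest_free_cells board row col → Pre_find_nearest_free_cells board row col → Spec_find_nearest_free_cells board row col (find_nearest_free_cells board row col)

-- ===== LEMMAS AND PROOFS =====

-- the canonical comprehension both ports are reduced to: free cells of the window clamped to [0,20)
def pvCanon (board : List (List String)) (row col : Int) : List (Int × Int) :=
  (PySem.List.pyRange (max 0 (row - 2)) (min 20 (row + 2)) 1).flatMap (fun r =>
    ((PySem.List.pyRange (max 0 (col - 2)) (min 20 (col + 2)) 1).filter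
        (fun c => pvCell board r c == " ")).map (fun c => (r, c)))

-- a foldl whose step never changes the accumulator returns the accumulator
theorem pv_foldl_fixed {α β : Type} (f : β → α → β) (acc : β) (l : List α)
    (h : ∀ x ∈ l, f acc x = acc) : l.foldl f acc = acc := by
  induction l with
  | nil => rfl
  | cons x xs ih =>
      simp only [List.foldl_cons, h x (by simp)]
      exact ih (fun y hy => h y (by simp [hy]))

-- elements whose image under g is empty can be dropped from a flatMap
theorem pv_flatMap_filter {α β : Type} (g : α → List β) (p : α → Bool) (l : List α)
    (h : ∀ x ∈ l, p x = false → g x = []) : l.flatMap g = (l.filter p).flatMap g := by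
  induction l with
  | nil => rfl
  | cons x xs ih =>
      by_cases hp : p x
      · simp [hp, ih (fun y hy => h y (by simp [hy]))]
      · simp only [Bool.not_eq_true] at hp
        simp [hp, h x (by simp) hp, ih (fun y hy => h y (by simp [hy]))]

-- clamping a step-1 range to [lo, hi) is the same as filtering it by the bound test
theorem pv_clamp (lo hi a b : Int) :
    (PySem.List.pyRange a b 1).filter (fun x => decide (lo ≤ x) && decide (x < hi))
      = PySem.List.pyRange (max lo a) (min hi b) 1 := by
  by_cases hba : b ≤ a
  · rw [PySem.List.pyRange_one_eq_nil hba, PySem.List.pyRange_one_eq_nil (by omega)]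
    rfl
  · have hba' : a < b := by omega
    clear hba
    obtain ⟨n, hn⟩ : ∃ n : Nat, b - a = (n : Int) := ⟨(b - a).toNat, by omega⟩
    induction n generalizing a with
    | zero => omega
    | succ m ih =>
        rw [PySem.List.pyRange_one_cons hba', List.filter_cons]
        by_cases h20 : a < hi
        · by_cases h0 : lo ≤ a
          · have hrhs : PySem.List.pyRange (max lo a) (min hi b) 1
                = a :: PySem.List.pyRange (a + 1) (min hi b) 1 := by
              rw [show max lo a = a by omega]
              exact PySem.List.pyRange_one_cons (by omega)
            rw [hrhs]
            simp only [h0, h20, decide_true, Bool.and_self, if_true]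
            congr 1
            by_cases hba2 : a + 1 < b
            · rw [ih (a + 1) hba2 (by omega), show max lo (a + 1) = a + 1 by omega]
            · rw [PySem.List.pyRange_one_eq_nil (by omega),
                  PySem.List.pyRange_one_eq_nil (by omega), List.filter_nil]
          · simp only [h0, decide_false, Bool.false_and, Bool.false_eq_true, if_false]
            by_cases hba2 : a + 1 < b
            · rw [ih (a + 1) hba2 (by omega), show max lo (a + 1) = max lo a by omega]
            · rw [PySem.List.pyRange_one_eq_nil (by omega),
                  PySem.List.pyRange_one_eq_nil (by omega), List.filter_nil]
        · rw [PySem.List.pyRange_one_eq_nil (show min hi b ≤ max lo a by omega)]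
          simp only [show ¬ a < hi from h20, decide_false, Bool.and_false, Bool.false_eq_true,
            if_false]
          apply List.filter_eq_nil_iff.mpr
          intro x hx
          rw [PySem.List.mem_pyRange_one] at hx
          simp only [Bool.and_eq_true, decide_eq_true_eq, not_and]
          omega

-- for an in-bounds row, A's per-cell guard is the free test plus the column bound test
theorem pv_pred (board : List (List String)) (r c : Int) (h0 : 0 ≤ r) (h20 : r < 20) :
    (decide ¬(r < 0 ∨ 20 ≤ r ∨ c < 0 ∨ 20 ≤ c ∨ pvCell board r c ≠ " "))
      = ((pvCell board r c == " ") && (decide (0 ≤ c) && decide (c < 20))) := by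
  by_cases h1 : 0 ≤ c <;> by_cases h2 : c < 20 <;> by_cases h3 : pvCell board r c = " " <;>
    simp [h1, h2, h3]
  omega

-- A's first (4x4) double loop computes exactly the canonical comprehension
theorem pv_first_loop (board : List (List String)) (row col : Int) :
    (PySem.List.pyRange (row - 2) (row - 2 + 4) 1).foldl (fun acc r =>
      (PySem.List.pyRange (col - 2) (col - 2 + 4) 1).foldl (fun acc c =>
        if r < 0 ∨ 20 ≤ r ∨ c < 0 ∨ 20 ≤ c ∨ pvCell board r c ≠ " " then acc
        else acc ++ [(r, c)]) acc) []
    = pvCanon board row col := by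
  have hinner : ∀ (r : Int) (acc : List (Int × Int)),
      (PySem.List.pyRange (col - 2) (col - 2 + 4) 1).foldl (fun acc c =>
        if r < 0 ∨ 20 ≤ r ∨ c < 0 ∨ 20 ≤ c ∨ pvCell board r c ≠ " " then acc
        else acc ++ [(r, c)]) acc
      = acc ++ ((PySem.List.pyRange (col - 2) (col - 2 + 4) 1).filter
          (fun c => decide ¬(r < 0 ∨ 20 ≤ r ∨ c < 0 ∨ 20 ≤ c ∨ pvCell board r c ≠ " "))).map
          (fun c => (r, c)) := by
    intro r acc
    rw [← PySem.List.foldl_append_ite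
      (fun c => ¬(r < 0 ∨ 20 ≤ r ∨ c < 0 ∨ 20 ≤ c ∨ pvCell board r c ≠ " "))
      (fun c => (r, c))]
    congr 1
    funext acc c
    rw [ite_not]
  simp only [hinner]
  rw [PySem.List.foldl_append_eq_flatMap]
  rw [pv_flatMap_filter _ (fun r => decide (0 ≤ r) && decide (r < 20)) _ (by
      intro r _ hr
      have hrb : r < 0 ∨ 20 ≤ r := by
        by_cases h : (0:Int) ≤ r
        · right; simpa [h] using hr
        · left; omega
      apply List.map_eq_nil_iff.mpr
      apply List.filter_eq_nil_iff.mpr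
      intro c _
      simp only [decide_eq_true_eq, not_not]
      tauto)]
  rw [show row - 2 + 4 = row + 2 by ring, pv_clamp 0 20]
  unfold pvCanon
  simp only [List.nil_append]
  apply List.flatMap_congr
  intro r hr
  rw [PySem.List.mem_pyRange_one] at hr
  congr 1
  rw [List.filter_congr (fun c _ => pv_pred board r c (by omega) (by omega)),
      ← List.filter_filter, pv_clamp 0 20, show col - 2 + 4 = col + 2 by ring]

-- membership in the canonical list, as bounds on the cell
theorem pv_mem_canon (board : List (List String)) (row col : Int) (r c : Int) :
    (r, c) ∈ pvCanon board row col ↔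
      (row - 2 ≤ r ∧ r < row + 2 ∧ col - 2 ≤ c ∧ c < col + 2 ∧
       0 ≤ r ∧ r < 20 ∧ 0 ≤ c ∧ c < 20 ∧ pvCell board r c = " ") := by
  unfold pvCanon
  simp only [List.mem_flatMap, List.mem_map, List.mem_filter, PySem.List.mem_pyRange_one,
    beq_iff_eq]
  constructor
  · rintro ⟨r', hr', c', ⟨⟨hc', hfree⟩, heq⟩⟩
    injection heq with e1 e2
    subst e1; subst e2
    exact ⟨by omega, by omega, by omega, by omega, by omega, by omega, by omega, by omega, hfree⟩
  · rintro ⟨h1, h2, h3, h4, h5, h6, h7, h8, h9⟩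
    exact ⟨r, by omega, ⟨c, ⟨⟨by omega, h9⟩, rfl⟩⟩⟩

-- A equals the canonical comprehension (second 2x2 pass never adds anything)
theorem pv_A_eq_canon (board : List (List String)) (row col : Int) :
    find_nearest_free_cells board row col = pvCanon board row col := by
  dsimp only [find_nearest_free_cells]
  rw [pv_first_loop board row col]
  apply pv_foldl_fixed
  intro r hr
  apply pv_foldl_fixed
  intro c hc
  rw [PySem.List.mem_pyRange_one] at hr hc
  by_cases hg : r < 0 ∨ 20 ≤ r ∨ c < 0 ∨ 20 ≤ c ∨ pvCell board r c ≠ " "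
  · simp [hg]
  · push Not at hg
    obtain ⟨h1, h2, h3, h4, h5⟩ := hg
    have hmem : (r, c) ∈ pvCanon board row col := by
      rw [pv_mem_canon]
      exact ⟨by omega, by omega, by omega, by omega, by omega, by omega, by omega, by omega, h5⟩
    simp [hmem, h5]

-- a window flatMap over [a, min b n) equals one over [a, b) when rows beyond n contribute nothing
theorem pv_flatMap_window {β : Type} (a b n : Int) (g g' : Int → List β)
    (hgg : ∀ r, a ≤ r → r < b → r < n → g r = g' r)
    (hout : ∀ r, n ≤ r → g' r = []) :
    (PySem.List.pyRange a (min b n) 1).flatMap g = (PySem.List.pyRange a b 1).flatMap g' := by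
  by_cases hba : b ≤ a
  · rw [PySem.List.pyRange_one_eq_nil (by omega), PySem.List.pyRange_one_eq_nil hba]
    simp
  · have hba' : a < b := by omega
    clear hba
    obtain ⟨m, hm⟩ : ∃ m : Nat, b - a = (m : Int) := ⟨(b - a).toNat, by omega⟩
    induction m generalizing a with
    | zero => omega
    | succ k ih =>
        by_cases hn : a < n
        · rw [PySem.List.pyRange_one_cons (show a < min b n by omega),
              PySem.List.pyRange_one_cons hba', List.flatMap_cons, List.flatMap_cons,
              hgg a le_rfl hba' hn]
          congr 1
          by_cases hba2 : a + 1 < b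
          · exact ih (a + 1) (fun r h1 h2 h3 => hgg r (by omega) h2 h3) hba2 (by omega)
          · rw [PySem.List.pyRange_one_eq_nil (by omega),
                PySem.List.pyRange_one_eq_nil (by omega)]
            simp
        · rw [PySem.List.pyRange_one_eq_nil (by omega)]
          symm
          apply List.flatMap_eq_nil_iff.mpr
          intro r hr
          rw [PySem.List.mem_pyRange_one] at hr
          exact hout r (by omega)

-- a filter over [a, min b n) equals one over [a, b) when the test fails from n on
theorem pv_filter_window (a b n : Int) (f : Int → Bool)
    (hout : ∀ c, n ≤ c → f c = false) :
    (PySem.List.pyRange a (min b n) 1).filter f = (PySem.List.pyRange a b 1).filter f := by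
  by_cases hna : n ≤ a
  · rw [PySem.List.pyRange_one_eq_nil (by omega)]
    symm
    apply List.filter_eq_nil_iff.mpr
    intro c hc
    rw [PySem.List.mem_pyRange_one] at hc
    simp [hout c (by omega)]
  · by_cases hba : b ≤ a
    · rw [PySem.List.pyRange_one_eq_nil (by omega), PySem.List.pyRange_one_eq_nil hba]
    · rw [PySem.List.pyRange_one_append a (min b n) b (by omega) (by omega),
          List.filter_append]
      have hnil : (PySem.List.pyRange (min b n) b 1).filter f = [] := by
        apply List.filter_eq_nil_iff.mpr
        intro c hc
        rw [PySem.List.mem_pyRange_one] at hc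
        simp [hout c (by omega)]
      rw [hnil, List.append_nil]

-- cells beyond the board (row ≥ length, or col ≥ row length) are never free
theorem pv_cell_out_row (board : List (List String)) (r c : Int)
    (h0 : 0 ≤ r) (h : (board.length : Int) ≤ r) : pvCell board r c = "" := by
  unfold pvCell
  rw [PySem.List.pyGet?_of_nonneg board h0, List.getElem?_eq_none (by omega)]
  simp [PySem.List.pyGet?]

-- B's row list at a nonnegative index is A's
theorem pv_line_eq (board : List (List String)) (r : Int) (h0 : 0 ≤ r) :
    PySem.List.pyGetD board r [] = (PySem.List.pyGet? board r).getD [] := by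
  rw [PySem.List.pyGetD_of_nonneg board [] h0, PySem.List.pyGet?_of_nonneg board h0]
  simp [List.getD]

theorem pv_cell_out_col (board : List (List String)) (r c : Int) (h0 : 0 ≤ r) (hc : 0 ≤ c)
    (h : (((PySem.List.pyGetD board r []).length : Int)) ≤ c) : pvCell board r c = "" := by
  rw [pv_line_eq board r h0] at h
  unfold pvCell
  rw [PySem.List.pyGet?_of_nonneg _ hc, List.getElem?_eq_none (by omega)]
  rfl

-- for a nonnegative index, B's enumerate cell is A's pvCell
theorem pv_cell_eq (board : List (List String)) (r c : Int) (h0 : 0 ≤ r) (hc : 0 ≤ c) :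
    PySem.List.pyGetD (PySem.List.pyGetD board r []) c ""
      = pvCell board r c := by
  unfold pvCell
  rw [PySem.List.pyGetD_of_nonneg board [] h0,
      PySem.List.pyGetD_of_nonneg _ "" hc,
      PySem.List.pyGet?_of_nonneg board h0, PySem.List.pyGet?_of_nonneg _ hc]
  simp [List.getD]

-- for an in-bounds cell, B's per-cell test is the free test plus the column bound test
theorem pv_pred2 (board : List (List String)) (r c : Int) (h0 : 0 ≤ r) (hc : 0 ≤ c) :
    decide (col - 2 ≤ c ∧ c < col + 2 ∧ c < 20 ∧ PySem.List.pyGetD (PySem.List.pyGetD board r []) c "" = " ")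
      = ((pvCell board r c == " ")
          && (decide (max 0 (col - 2) ≤ c) && decide (c < min 20 (col + 2)))) := by
  rw [pv_cell_eq board r c h0 hc]
  by_cases h1 : col - 2 ≤ c <;> by_cases h2 : c < col + 2 <;> by_cases h3 : c < 20 <;>
    by_cases h4 : pvCell board r c = " " <;>
    simp [h1, h2, h3, h4] <;> omega

-- B's scan of one in-bounds row is the canonical row comprehension
theorem pv_row_eq (board : List (List String)) (col : Int) (r : Int)
    (h0 : 0 ≤ r) :
    ((PySem.List.enumerate (PySem.List.pyGetD board r [])).filter
        (fun q => decide (col - 2 ≤ q.1 ∧ q.1 < col + 2 ∧ q.1 < 20 ∧ q.2 = " "))).map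
        (fun q => (r, q.1))
      = ((PySem.List.pyRange (max 0 (col - 2)) (min 20 (col + 2)) 1).filter
          (fun c => pvCell board r c == " ")).map (fun c => (r, c)) := by
  rw [PySem.List.enumerate_eq_map_pyRange (PySem.List.pyGetD board r []) "",
      List.filter_map, List.map_map]
  simp only [PySem.List.len_eq]
  have hcongr : ∀ c ∈ PySem.List.pyRange 0 ((PySem.List.pyGetD board r []).length : Int) 1,
      ((fun q : Int × String => decide (col - 2 ≤ q.1 ∧ q.1 < col + 2 ∧ q.1 < 20 ∧ q.2 = " ")) ∘
        (fun j => (j, PySem.List.pyGetD (PySem.List.pyGetD board r []) j ""))) c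
      = ((pvCell board r c == " ")
          && (decide (max 0 (col - 2) ≤ c) && decide (c < min 20 (col + 2)))) := by
    intro c hcm
    rw [PySem.List.mem_pyRange_one] at hcm
    exact pv_pred2 board r c h0 (by omega)
  rw [List.filter_congr hcongr, ← List.filter_filter, pv_clamp (max 0 (col - 2)) (min 20 (col + 2)),
      show max (max 0 (col - 2)) 0 = max 0 (col - 2) by omega]
  rw [pv_filter_window (max 0 (col - 2)) (min 20 (col + 2))
        ((PySem.List.pyGetD board r []).length : Int)
        (fun c => pvCell board r c == " ")
        (fun c hcL => by
          simp only [beq_eq_false_iff_ne, ne_eq]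
          rw [pv_cell_out_col board r c h0 (by omega) hcL]
          simp)]
  simp

-- B equals the canonical comprehension
theorem pv_B_eq_canon (board : List (List String)) (row col : Int) :
    find_nearest_free_cells_alt board row col = pvCanon board row col := by
  unfold find_nearest_free_cells_alt
  have hinner : ∀ (r : Int) (line : List String) (out : List (Int × Int)),
      (PySem.List.enumerate line).foldl (fun out q =>
        if col - 2 ≤ q.1 ∧ q.1 < col + 2 ∧ q.1 < 20 ∧ q.2 = " " then out ++ [(r, q.1)]
        else out) out
      = out ++ ((PySem.List.enumerate line).filter
          (fun q => decide (col - 2 ≤ q.1 ∧ q.1 < col + 2 ∧ q.1 < 20 ∧ q.2 = " "))).map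
          (fun q => (r, q.1)) := by
    intro r line out
    exact PySem.List.foldl_append_ite
      (fun q : Int × String => col - 2 ≤ q.1 ∧ q.1 < col + 2 ∧ q.1 < 20 ∧ q.2 = " ")
      (fun q => (r, q.1)) (PySem.List.enumerate line) out
  simp only [hinner]
  have hstep : (fun (out : List (Int × Int)) (p : Int × List String) =>
      if p.1 < row - 2 ∨ row + 2 ≤ p.1 ∨ 20 ≤ p.1 then out
      else out ++ ((PySem.List.enumerate p.2).filter
          (fun q => decide (col - 2 ≤ q.1 ∧ q.1 < col + 2 ∧ q.1 < 20 ∧ q.2 = " "))).map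
          (fun q => (p.1, q.1)))
      = (fun out p => out ++ (if p.1 < row - 2 ∨ row + 2 ≤ p.1 ∨ 20 ≤ p.1 then []
          else ((PySem.List.enumerate p.2).filter
            (fun q => decide (col - 2 ≤ q.1 ∧ q.1 < col + 2 ∧ q.1 < 20 ∧ q.2 = " "))).map
            (fun q => (p.1, q.1)))) := by
    funext out p
    by_cases hg : p.1 < row - 2 ∨ row + 2 ≤ p.1 ∨ 20 ≤ p.1 <;> simp [hg]
  rw [hstep, PySem.List.foldl_append_eq_flatMap,
      PySem.List.enumerate_eq_map_pyRange board ([] : List String), List.flatMap_map,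
      List.nil_append]
  simp only [PySem.List.len_eq]
  rw [pv_flatMap_filter _
      (fun j => decide (max 0 (row - 2) ≤ j ∧ j < min 20 (row + 2))) _
      (by
        intro j hj hpf
        rw [PySem.List.mem_pyRange_one] at hj
        simp only [decide_eq_false_iff_not, not_and, not_lt] at hpf
        have : j < row - 2 ∨ row + 2 ≤ j ∨ 20 ≤ j := by omega
        simp [this])]
  rw [show (fun j => decide (max 0 (row - 2) ≤ j ∧ j < min 20 (row + 2)))
        = (fun j => decide (max 0 (row - 2) ≤ j) && decide (j < min 20 (row + 2)))
        from funext fun j => by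
          by_cases h1 : max 0 (row - 2) ≤ j <;> by_cases h2 : j < min 20 (row + 2) <;>
            simp [h1, h2],
      pv_clamp (max 0 (row - 2)) (min 20 (row + 2)),
      show max (max 0 (row - 2)) 0 = max 0 (row - 2) by omega]
  rw [pv_flatMap_window (max 0 (row - 2)) (min 20 (row + 2)) (board.length : Int) _ _
      (fun r h1 h2 h3 => by
        have hg : ¬ (r < row - 2 ∨ row + 2 ≤ r ∨ 20 ≤ r) := by omega
        simp only [hg, if_false]
        exact pv_row_eq board col r (by omega))
      (fun r hr => by
        apply List.map_eq_nil_iff.mpr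
        apply List.filter_eq_nil_iff.mpr
        intro c hc
        rw [PySem.List.mem_pyRange_one] at hc
        simp [pv_cell_out_row board r c (by omega) hr])]
  rfl

-- ===== VERDICT (by name: the statement is the Claim_ definition above) =====
theorem find_nearest_free_cells_spec : Claim_equal_find_nearest_free_cells := by
  intro board row col _ _
  unfold Spec_find_nearest_free_cells
  rw [pv_A_eq_canon, pv_B_eq_canon]
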